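-- pv_equiv track=rewrite | github.com/enigmanx20/PathLMbench_JP | typo_utils.py | _merge_adjacent_ops
-- ===== SOURCE A (Python) =====
-- from typing import List, Dict, Tuple, Any
--
-- def _merge_adjacent_ops(ops: List[Tuple[str,int,int,int,int]]) -> List[Tuple[int,int,int,int]]:
--     """
--     Merge consecutive non-equal opcodes to stabilize diff granularity.
--     Returns merged blocks as (i1,i2,j1,j2) on (typo_text, corrected_text).
--     """
--     merged = []
--     cur = None  # (i1,i2,j1,j2)
--     for tag, i1, i2, j1, j2 in ops:
--         if tag == "equal":
--             if cur is not None: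
--                 merged.append(cur)
--                 cur = None
--             continue
--         if cur is None:
--             cur = (i1, i2, j1, j2)
--         else:
--             ci1, ci2, cj1, cj2 = cur
--             # Extend to cover this adjacent/overlapping change block
--             cur = (ci1, max(ci2, i2), cj1, max(cj2, j2))
--     if cur is not None:
--         merged.append(cur)
--     return merged
-- ===== SOURCE B (Python) =====
-- from typing import List, Tuple
--
--
-- def _merge_adjacent_ops(ops: List[Tuple[str, int, int, int, int]]) -> List[Tuple[int, int, int, int]]:
--     # Staged boundary-detection: mark changed positions, find run starts/ends by
--     # comparing each flag with its shifted neighbours, then reduce each run slice.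
--     change = [op[0] != "equal" for op in ops]
--     prev = [False] + change[:-1]
--     nxt = change[1:] + [False]
--     starts = [k for k, (c, p) in enumerate(zip(change, prev)) if c and not p]
--     ends = [k for k, (c, n) in enumerate(zip(change, nxt)) if c and not n]
--     return [
--         (ops[s][1],
--          max(op[2] for op in ops[s:e + 1]),
--          ops[s][3],
--          max(op[4] for op in ops[s:e + 1]))
--         for s, e in zip(starts, ends)
--     ]
-- ===== Notes on version B (the rewrite author's own statement) =====
-- stated objective: alternative
-- what changed: Replaces A's single streaming pass with a flush-on-'equal' accumulator by a staged, stateless pipeline: a boolean change mask, run starts/ends found by zipping the mask with its shifted copies, and each (start,end) pair reduced over a slice of ops with max().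
import Mathlib
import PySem

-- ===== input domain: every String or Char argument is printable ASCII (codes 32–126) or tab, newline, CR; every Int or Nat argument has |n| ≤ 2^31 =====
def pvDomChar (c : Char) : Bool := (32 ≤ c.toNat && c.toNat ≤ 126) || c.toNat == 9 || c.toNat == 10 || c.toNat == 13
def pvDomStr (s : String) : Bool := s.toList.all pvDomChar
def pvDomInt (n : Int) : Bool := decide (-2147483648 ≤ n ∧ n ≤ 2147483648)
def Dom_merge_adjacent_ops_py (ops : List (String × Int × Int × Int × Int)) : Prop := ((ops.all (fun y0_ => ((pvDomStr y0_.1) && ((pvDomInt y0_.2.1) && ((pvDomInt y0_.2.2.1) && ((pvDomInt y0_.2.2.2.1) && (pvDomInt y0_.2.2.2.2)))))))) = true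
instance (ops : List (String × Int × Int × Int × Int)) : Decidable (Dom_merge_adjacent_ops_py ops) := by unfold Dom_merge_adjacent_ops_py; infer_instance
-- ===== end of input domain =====

-- B replaces A's streaming flush-on-"equal" accumulator pass by a staged stateless
-- pipeline: change mask, run boundaries via zips with shifted masks, slice-reduce
-- each run (objective: alternative; same cost).

-- ===== PORT A =====
-- Literal port of A: one fold carrying (merged, cur); 'equal' flushes cur, a
-- non-equal op starts cur or extends it with max; a trailing cur is flushed at the end.
def merge_adjacent_ops_py (ops : List (String × Int × Int × Int × Int)) : List (Int × Int × Int × Int) :=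
  let st := ops.foldl
    (fun (st : List (Int × Int × Int × Int) × Option (Int × Int × Int × Int)) op =>
      let (merged, cur) := st
      let (tag, i1, i2, j1, j2) := op
      if tag = "equal" then
        match cur with
        | some c => (merged ++ [c], none)
        | none => (merged, none)
      else
        match cur with
        | none => (merged, some (i1, i2, j1, j2))
        | some (ci1, ci2, cj1, cj2) => (merged, some (ci1, max ci2 i2, cj1, max cj2 j2)))
    ([], none)
  match st.2 with
  | some c => st.1 ++ [c]
  | none => st.1

-- ===== PORT B =====
-- the body of B's final comprehension for one (s, e) pair:
-- (ops[s][1], max(op[2] for op in ops[s:e+1]), ops[s][3], max(op[4] for op in ops[s:e+1]))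
-- ops[s] is ported with pyGet? + a default never used (s is an in-range index produced
-- by enumerate); max(...) over the non-empty slice is PySem.List.max? + a default never used.
def bBlockB (ops : List (String × Int × Int × Int × Int)) (se : Int × Int) : Int × Int × Int × Int :=
  let seg := PySem.List.slice ops (some se.1) (some (se.2 + 1))
  (((PySem.List.pyGet? ops se.1).getD ("", 0, 0, 0, 0)).2.1,
   (PySem.List.max? (seg.map (fun op => op.2.2.1)) (fun v => v)).getD 0,
   ((PySem.List.pyGet? ops se.1).getD ("", 0, 0, 0, 0)).2.2.2.1,
   (PySem.List.max? (seg.map (fun op => op.2.2.2.2)) (fun v => v)).getD 0)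

-- Literal port of B (Source B): change mask; prev/nxt = shifted masks (change[:-1] and
-- change[1:] are Python slices, PySem.List.slice); starts/ends as filtered enumerates
-- of the zips; final comprehension maps bBlockB over zip(starts, ends).
def merge_adjacent_ops_py_alt (ops : List (String × Int × Int × Int × Int)) : List (Int × Int × Int × Int) :=
  let change : List Bool := ops.map (fun op => decide (op.1 ≠ "equal"))
  let prev : List Bool := false :: PySem.List.slice change none (some (-1))
  let nxt : List Bool := PySem.List.slice change (some 1) none ++ [false]
  let starts : List Int := (PySem.List.enumerate (change.zip prev) 0).filterMap
    (fun kcp => if kcp.2.1 && !kcp.2.2 then some kcp.1 else none)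
  let ends : List Int := (PySem.List.enumerate (change.zip nxt) 0).filterMap
    (fun kcn => if kcn.2.1 && !kcn.2.2 then some kcn.1 else none)
  (starts.zip ends).map (bBlockB ops)

-- ===== PRECONDITION & SPEC =====
def Spec_merge_adjacent_ops_py (ops : List (String × Int × Int × Int × Int)) (out : List (Int × Int × Int × Int)) : Prop := out = merge_adjacent_ops_py_alt ops
instance (ops : List (String × Int × Int × Int × Int)) (out : List (Int × Int × Int × Int)) : Decidable (Spec_merge_adjacent_ops_py ops out) := by unfold Spec_merge_adjacent_ops_py; infer_instance

-- ===== CLAIM (what is proved, stated in full; the proofs are below) =====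
def Claim_equal_merge_adjacent_ops_py : Prop := ∀ (ops : List (String × Int × Int × Int × Int)), Dom_merge_adjacent_ops_py ops → Spec_merge_adjacent_ops_py ops (merge_adjacent_ops_py ops)

-- ===== LEMMAS AND PROOFS =====

-- ---- common recursive reference function mergeR (the merged-blocks spec) ----

def pvFlag (op : String × Int × Int × Int × Int) : Bool := decide (op.1 ≠ "equal")

def pvBlock1 (x : String × Int × Int × Int × Int) : Int × Int × Int × Int :=
  (x.2.1, x.2.2.1, x.2.2.2.1, x.2.2.2.2)

def pvExtend (x : String × Int × Int × Int × Int) :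
    List (Int × Int × Int × Int) → List (Int × Int × Int × Int)
  | [] => [pvBlock1 x]
  | (_, b2, _, b4) :: bs => (x.2.1, max x.2.2.1 b2, x.2.2.2.1, max x.2.2.2.2 b4) :: bs

def pvMergeR : List (String × Int × Int × Int × Int) → List (Int × Int × Int × Int)
  | [] => []
  | x :: xs =>
    if pvFlag x then
      match xs with
      | y :: _ => if pvFlag y then pvExtend x (pvMergeR xs) else pvBlock1 x :: pvMergeR xs
      | [] => pvBlock1 x :: pvMergeR xs
    else pvMergeR xs

-- ---- A = mergeR ----

def pvStepA (st : List (Int × Int × Int × Int) × Option (Int × Int × Int × Int))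
    (op : String × Int × Int × Int × Int) :
    List (Int × Int × Int × Int) × Option (Int × Int × Int × Int) :=
  let (merged, cur) := st
  let (tag, i1, i2, j1, j2) := op
  if tag = "equal" then
    match cur with
    | some c => (merged ++ [c], none)
    | none => (merged, none)
  else
    match cur with
    | none => (merged, some (i1, i2, j1, j2))
    | some (ci1, ci2, cj1, cj2) => (merged, some (ci1, max ci2 i2, cj1, max cj2 j2))

-- recursive characterisation of A's loop from state cur
def pvRunA : Option (Int × Int × Int × Int) → List (String × Int × Int × Int × Int) → List (Int × Int × Int × Int)
  | cur, [] => match cur with | some c => [c] | none => []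
  | cur, op :: rest =>
    if op.1 = "equal" then
      (match cur with | some c => [c] | none => []) ++ pvRunA none rest
    else
      match cur with
      | none => pvRunA (some (op.2.1, op.2.2.1, op.2.2.2.1, op.2.2.2.2)) rest
      | some (a, b, c, d) => pvRunA (some (a, max b op.2.2.1, c, max d op.2.2.2.2)) rest

def pvFinish (st : List (Int × Int × Int × Int) × Option (Int × Int × Int × Int)) : List (Int × Int × Int × Int) :=
  match st.2 with
  | some c => st.1 ++ [c]
  | none => st.1

theorem pvFoldA (ops : List (String × Int × Int × Int × Int)) :
    ∀ (merged : List (Int × Int × Int × Int)) (cur : Option (Int × Int × Int × Int)),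
    pvFinish (ops.foldl pvStepA (merged, cur)) = merged ++ pvRunA cur ops := by
  induction ops with
  | nil =>
    intro merged cur
    cases cur <;> simp [pvFinish, pvRunA]
  | cons op rest ih =>
    intro merged cur
    obtain ⟨tag, i1, i2, j1, j2⟩ := op
    by_cases h : tag = "equal"
    · cases cur with
      | none => simp [pvStepA, pvRunA, h, ih]
      | some c => simp [pvStepA, pvRunA, h, ih]
    · cases cur with
      | none => simp [pvStepA, pvRunA, h, ih]
      | some c =>
        obtain ⟨a, b, cc, d⟩ := c
        simp [pvStepA, pvRunA, h, ih]

theorem pvA_eq_runA (ops : List (String × Int × Int × Int × Int)) :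
    merge_adjacent_ops_py ops = pvRunA none ops := by
  have := pvFoldA ops [] none
  simpa [merge_adjacent_ops_py, pvFinish, pvStepA] using this

-- pvRunA with a pending block: how the pending block merges with mergeR of the rest
def pvCM (c : Int × Int × Int × Int) (xs : List (String × Int × Int × Int × Int))
    (l : List (Int × Int × Int × Int)) : List (Int × Int × Int × Int) :=
  match xs with
  | y :: _ =>
    if pvFlag y then
      match l with
      | (_, b2, _, b4) :: bs => (c.1, max c.2.1 b2, c.2.2.1, max c.2.2.2 b4) :: bs
      | [] => [c]
    else c :: l
  | [] => c :: l

theorem pvMergeR_cons (x : String × Int × Int × Int × Int)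
    (xs : List (String × Int × Int × Int × Int)) :
    pvMergeR (x :: xs) =
      if pvFlag x then
        match xs with
        | y :: _ => if pvFlag y then pvExtend x (pvMergeR xs) else pvBlock1 x :: pvMergeR xs
        | [] => pvBlock1 x :: pvMergeR xs
      else pvMergeR xs := rfl

theorem pvRunA_mergeR (xs : List (String × Int × Int × Int × Int)) :
    pvRunA none xs = pvMergeR xs ∧
      ∀ a b c d, pvRunA (some (a, b, c, d)) xs = pvCM (a, b, c, d) xs (pvMergeR xs) := by
  induction xs with
  | nil => exact ⟨rfl, fun a b c d => rfl⟩
  | cons x xs ih =>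
    obtain ⟨ih1, ih2⟩ := ih
    by_cases hx : x.1 = "equal"
    · have hfx : pvFlag x = false := by simp [pvFlag, hx]
      constructor
      · simp [pvRunA, hx, ih1, pvMergeR_cons, hfx]
      · intro a b c d
        simp [pvRunA, hx, ih1, pvMergeR_cons, hfx, pvCM]
    · have hfx : pvFlag x = true := by simp [pvFlag, hx]
      have hx' : pvRunA none (x :: xs) =
          pvCM (x.2.1, x.2.2.1, x.2.2.2.1, x.2.2.2.2) xs (pvMergeR xs) := by
        rw [show pvRunA none (x :: xs)
              = pvRunA (some (x.2.1, x.2.2.1, x.2.2.2.1, x.2.2.2.2)) xs by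
            simp [pvRunA, hx]]
        exact ih2 _ _ _ _
      constructor
      · rw [hx', pvMergeR_cons, if_pos hfx]
        cases xs with
        | nil => simp [pvCM, pvBlock1]
        | cons y t =>
          by_cases hy : pvFlag y
          · simp only [hy, if_pos]
            cases hm : pvMergeR (y :: t) with
            | nil => simp [pvCM, hy, pvExtend, pvBlock1]
            | cons bhd bs =>
              obtain ⟨b1, b2, b3, b4⟩ := bhd
              simp [pvCM, hy, pvExtend]
          · simp [pvCM, hy, pvBlock1]
      · intro a b c d
        have step : pvRunA (some (a, b, c, d)) (x :: xs)
            = pvRunA (some (a, max b x.2.2.1, c, max d x.2.2.2.2)) xs := by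
          simp [pvRunA, hx]
        rw [step, ih2]
        rw [pvMergeR_cons, if_pos hfx]
        cases xs with
        | nil =>
          simp [pvCM, hfx, pvBlock1]
        | cons y t =>
          by_cases hy : pvFlag y
          · simp only [hy, if_pos]
            cases hm : pvMergeR (y :: t) with
            | nil => simp [pvCM, hy, hfx, pvExtend, pvBlock1]
            | cons bhd bs =>
              obtain ⟨b1, b2, b3, b4⟩ := bhd
              simp [pvCM, hy, hfx, pvExtend, max_assoc]
          · simp [pvCM, hy, hfx, pvBlock1]

-- ---- B = mergeR ----

-- Nat-indexed run-start / run-end scanners (prev flag threaded / next flag peeked)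
def pvNS (p : Bool) (n : Nat) : List Bool → List Nat
  | [] => []
  | c :: cs => (if c && !p then [n] else []) ++ pvNS c (n + 1) cs

def pvNE (n : Nat) : List Bool → List Nat
  | [] => []
  | c :: cs => (if c && !(cs.headD false) then [n] else []) ++ pvNE (n + 1) cs

-- max over a non-empty list as B's port computes it (0 for [] is never reached)
def pvMx : List Int → Int
  | [] => 0
  | h :: t => t.foldl max h

-- Nat-indexed block reduction
def pvBlockN (ops : List (String × Int × Int × Int × Int)) (s e : Nat) : Int × Int × Int × Int :=
  let seg := (ops.drop s).take (e + 1 - s)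
  ((ops[s]?.getD ("", 0, 0, 0, 0)).2.1,
   pvMx (seg.map (fun op => op.2.2.1)),
   (ops[s]?.getD ("", 0, 0, 0, 0)).2.2.2.1,
   pvMx (seg.map (fun op => op.2.2.2.2)))

def pvAlt (ops : List (String × Int × Int × Int × Int)) : List (Int × Int × Int × Int) :=
  ((pvNS false 0 (ops.map pvFlag)).zip (pvNE 0 (ops.map pvFlag))).map
    (fun se => pvBlockN ops se.1 se.2)

-- the port's body with the lets substituted (definitional)
theorem pvPortB (ops : List (String × Int × Int × Int × Int)) :
    merge_adjacent_ops_py_alt ops =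
      (((PySem.List.enumerate ((ops.map pvFlag).zip
            (false :: PySem.List.slice (ops.map pvFlag) none (some (-1)))) 0).filterMap
          (fun kcp => if kcp.2.1 && !kcp.2.2 then some kcp.1 else none)).zip
        ((PySem.List.enumerate ((ops.map pvFlag).zip
            (PySem.List.slice (ops.map pvFlag) (some 1) none ++ [false])) 0).filterMap
          (fun kcn => if kcn.2.1 && !kcn.2.2 then some kcn.1 else none))).map (bBlockB ops) := rfl

-- zip with [False]+change[:-1] equals zip with False::change (zip truncates)
theorem pvZipPrev (cs : List Bool) (p : Bool) :
    cs.zip (p :: cs.dropLast) = cs.zip (p :: cs) := by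
  induction cs generalizing p with
  | nil => rfl
  | cons c cs ih =>
    cases cs with
    | nil => rfl
    | cons d cs' => simpa [List.zip] using ih (p := c)

-- filtered enumerate of zip-with-prev is the Int cast of pvNS
theorem pvStarts_eq (cs : List Bool) (p : Bool) (n : Nat) :
    (PySem.List.enumerate (cs.zip (p :: cs)) (n : Int)).filterMap
        (fun kcp => if kcp.2.1 && !kcp.2.2 then some kcp.1 else none)
      = (pvNS p n cs).map (fun k : Nat => (k : Int)) := by
  induction cs generalizing p n with
  | nil => rfl
  | cons c cs ih =>
    rw [show (c :: cs).zip (p :: c :: cs) = (c, p) :: cs.zip (c :: cs) from rfl,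
        PySem.List.enumerate_cons, List.filterMap_cons,
        show ((n : Int) + 1) = ((n + 1 : Nat) : Int) by push_cast; ring,
        ih (p := c) (n := n + 1)]
    cases hc : (c && !p) <;> simp [pvNS, hc]

-- zip with change[1:]+[False] peels off (c, head-of-rest-or-False)
theorem pvZipNxt (c : Bool) (cs : List Bool) :
    (c :: cs).zip ((c :: cs).drop 1 ++ [false])
      = (c, cs.headD false) :: cs.zip (cs.drop 1 ++ [false]) := by
  cases cs with
  | nil => rfl
  | cons d cs' => rfl

theorem pvEnds_eq (cs : List Bool) (n : Nat) :
    (PySem.List.enumerate (cs.zip (cs.drop 1 ++ [false])) (n : Int)).filterMap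
        (fun kcn => if kcn.2.1 && !kcn.2.2 then some kcn.1 else none)
      = (pvNE n cs).map (fun k : Nat => (k : Int)) := by
  induction cs generalizing n with
  | nil => rfl
  | cons c cs ih =>
    rw [pvZipNxt, PySem.List.enumerate_cons, List.filterMap_cons,
        show ((n : Int) + 1) = ((n + 1 : Nat) : Int) by push_cast; ring,
        ih (n := n + 1)]
    cases hc : (c && !(cs.headD false)) <;> rw [pvNE, hc] <;> simp

-- the Int block of the port at cast indices is the Nat block
theorem pvBlockB_eq (ops : List (String × Int × Int × Int × Int)) (s e : Nat) :
    bBlockB ops ((s : Int), (e : Int)) = pvBlockN ops s e := by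
  have hslice : PySem.List.slice ops (some (s : Int)) (some ((e : Int) + 1))
      = (ops.drop s).take (e + 1 - s) := by
    have : ((e : Int) + 1) = ((e + 1 : Nat) : Int) := by push_cast; ring
    rw [this, PySem.List.slice_natCast]
  have hmx : ∀ (l : List Int), (PySem.List.max? l (fun v => v)).getD 0 = pvMx l := by
    intro l
    cases l with
    | nil => rfl
    | cons h t => rw [PySem.List.max?_id_cons]; rfl
  simp only [bBlockB, hslice, PySem.List.pyGet?_natCast, pvBlockN, hmx]

-- mapping a pair function over the zip of two Int-cast lists, on the Nat side
theorem pvMapZipCast (S E : List Nat) (F : Int × Int → Int × Int × Int × Int)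
    (G : Nat × Nat → Int × Int × Int × Int)
    (h : ∀ (s e : Nat), F ((s : Int), (e : Int)) = G (s, e)) :
    ((S.map (fun k : Nat => (k : Int))).zip (E.map (fun k : Nat => (k : Int)))).map F = (S.zip E).map G := by
  induction S generalizing E with
  | nil => rfl
  | cons s S ih =>
    cases E with
    | nil => rfl
    | cons e E =>
      simp only [List.map_cons, List.zip_cons_cons, ih]
      rw [h s e]

-- the port is pvAlt
theorem pvAlt_eq_port (ops : List (String × Int × Int × Int × Int)) :
    merge_adjacent_ops_py_alt ops = pvAlt ops := by
  rw [pvPortB, pvAlt]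
  rw [PySem.List.slice_to_neg_one, PySem.List.slice_from_one]
  have hdrop : (ops.map pvFlag).tail = (ops.map pvFlag).drop 1 := by
    cases ops <;> rfl
  rw [hdrop, pvZipPrev, show ((0 : Int) = ((0 : Nat) : Int)) by simp,
      pvStarts_eq, pvEnds_eq]
  exact pvMapZipCast _ _ (bBlockB ops) (fun se => pvBlockN ops se.1 se.2)
    (fun s e => pvBlockB_eq ops s e)

-- shift lemmas
theorem pvNS_shift (cs : List Bool) (p : Bool) (n : Nat) :
    pvNS p (n + 1) cs = (pvNS p n cs).map (fun k => k + 1) := by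
  induction cs generalizing p n with
  | nil => rfl
  | cons c cs ih =>
    cases hc : (c && !p) <;> simp [pvNS, hc, ih (p := c) (n := n + 1)]

theorem pvNE_shift (cs : List Bool) (n : Nat) :
    pvNE (n + 1) cs = (pvNE n cs).map (fun k => k + 1) := by
  induction cs generalizing n with
  | nil => rfl
  | cons c cs ih =>
    rw [pvNE, pvNE, List.map_append]
    congr 1
    · split <;> rfl
    · exact ih (n := n + 1)

-- block shift under cons
theorem pvBlockN_shift (x : String × Int × Int × Int × Int)
    (ops : List (String × Int × Int × Int × Int)) (s e : Nat) :
    pvBlockN (x :: ops) (s + 1) (e + 1) = pvBlockN ops s e := by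
  simp [pvBlockN, Nat.add_sub_add_right]

-- mapping the block function over the zip of two shifted index lists drops the cons
theorem pvMapZipSucc (x : String × Int × Int × Int × Int)
    (ops : List (String × Int × Int × Int × Int)) (S E : List Nat) :
    ((S.map (fun k => k + 1)).zip (E.map (fun k => k + 1))).map
        (fun se => pvBlockN (x :: ops) se.1 se.2)
      = (S.zip E).map (fun se => pvBlockN ops se.1 se.2) := by
  induction S generalizing E with
  | nil => rfl
  | cons s S ih =>
    cases E with
    | nil => rfl
    | cons e E => simp [pvBlockN_shift, ih]

-- ends of a run that is still open are non-empty
theorem pvNE_true_ne_nil (cs : List Bool) (n : Nat) : pvNE n (true :: cs) ≠ [] := by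
  induction cs generalizing n with
  | nil => simp [pvNE]
  | cons d cs' ih =>
    cases d with
    | false => simp [pvNE]
    | true =>
      have h : pvNE n (true :: true :: cs') = pvNE (n + 1) (true :: cs') := by
        conv_lhs => rw [pvNE]
        simp
      rw [h]
      exact ih (n := n + 1)

-- folding max over a cons pulls the head out
theorem pvMx_cons (a h : Int) (t : List Int) : pvMx (a :: h :: t) = max a (pvMx (h :: t)) := by
  show (h :: t).foldl max a = max a (t.foldl max h)
  induction t generalizing a h with
  | nil => rfl
  | cons z t ih =>
    show (z :: t).foldl max (max a h) = max a ((z :: t).foldl max h)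
    calc (z :: t).foldl max (max a h) = t.foldl max (max (max a h) z) := rfl
      _ = t.foldl max (max a (max h z)) := by rw [max_assoc]
      _ = max a (t.foldl max (max h z)) := ih a (max h z)
      _ = max a ((z :: t).foldl max h) := rfl

-- the leading op of an extended run merges into the head block
theorem pvBlockN_extend (x y : String × Int × Int × Int × Int)
    (rest : List (String × Int × Int × Int × Int)) (e0 : Nat) :
    pvBlockN (x :: y :: rest) 0 (e0 + 1)
      = (x.2.1, max x.2.2.1 (pvBlockN (y :: rest) 0 e0).2.1,
         x.2.2.2.1, max x.2.2.2.2 (pvBlockN (y :: rest) 0 e0).2.2.2) := by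
  simp [pvBlockN, List.take_succ_cons, pvMx_cons]

-- a one-op run is its own block
theorem pvBlockN_single (x : String × Int × Int × Int × Int)
    (xs : List (String × Int × Int × Int × Int)) :
    pvBlockN (x :: xs) 0 0 = pvBlock1 x := by
  simp [pvBlockN, pvMx, pvBlock1]

-- main induction: pvAlt = pvMergeR
theorem pvAlt_eq_mergeR (ops : List (String × Int × Int × Int × Int)) :
    pvAlt ops = pvMergeR ops := by
  induction ops with
  | nil => rfl
  | cons x xs ih =>
    by_cases hx : pvFlag x
    · cases xs with
      | nil =>
        simp [pvAlt, pvMergeR, hx, pvNS, pvNE, pvBlockN, pvMx, pvBlock1]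
      | cons y rest =>
        have hds : (y :: rest).map pvFlag = pvFlag y :: rest.map pvFlag := rfl
        by_cases hy : pvFlag y
        · -- the run continues through y: x extends the head block of pvAlt (y::rest)
          have hcs : (x :: y :: rest).map pvFlag = true :: true :: rest.map pvFlag := by
            simp [hx, hy]
          have hS : pvNS false 0 (true :: true :: rest.map pvFlag)
              = 0 :: (pvNS true 1 (rest.map pvFlag)).map (fun k => k + 1) := by
            rw [show pvNS false 0 (true :: true :: rest.map pvFlag)
                  = 0 :: pvNS true 2 (rest.map pvFlag) by simp [pvNS],
                show (2 : Nat) = 1 + 1 from rfl, pvNS_shift]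
          have hE : pvNE 0 (true :: true :: rest.map pvFlag)
              = (pvNE 0 (true :: rest.map pvFlag)).map (fun k => k + 1) := by
            rw [show pvNE 0 (true :: true :: rest.map pvFlag)
                  = pvNE 1 (true :: rest.map pvFlag) by simp [pvNE],
                show (1 : Nat) = 0 + 1 from rfl, pvNE_shift]
          obtain ⟨e0, E, hE0⟩ : ∃ e0 E, pvNE 0 (true :: rest.map pvFlag) = e0 :: E := by
            cases h : pvNE 0 (true :: rest.map pvFlag) with
            | nil => exact absurd h (pvNE_true_ne_nil _ 0)
            | cons a b => exact ⟨a, b, rfl⟩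
          have hSxs : pvNS false 0 (true :: rest.map pvFlag)
              = 0 :: pvNS true 1 (rest.map pvFlag) := by simp [pvNS]
          have hAltXs : pvAlt (y :: rest)
              = pvBlockN (y :: rest) 0 e0 :: ((pvNS true 1 (rest.map pvFlag)).zip E).map
                  (fun se => pvBlockN (y :: rest) se.1 se.2) := by
            rw [pvAlt, hds, hy, hSxs, hE0, List.zip_cons_cons, List.map_cons]
          have hAlt : pvAlt (x :: y :: rest)
              = pvBlockN (x :: y :: rest) 0 (e0 + 1) ::
                  ((pvNS true 1 (rest.map pvFlag)).zip E).map
                    (fun se => pvBlockN (y :: rest) se.1 se.2) := by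
            rw [pvAlt, hcs, hS, hE, hE0, List.map_cons, List.zip_cons_cons, List.map_cons,
                pvMapZipSucc]
          have hM : pvMergeR (x :: y :: rest) = pvExtend x (pvMergeR (y :: rest)) := by
            rw [pvMergeR_cons]
            simp [hx, hy]
          obtain ⟨b1, b2, b3, b4, hB⟩ :
              ∃ b1 b2 b3 b4, pvBlockN (y :: rest) 0 e0 = (b1, b2, b3, b4) :=
            ⟨_, _, _, _, rfl⟩
          rw [hAlt, hM, ← ih, hAltXs, hB, pvBlockN_extend, hB, pvExtend]
        · -- the run ends at x: x is its own block, the rest shifts by one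
          have hy' : pvFlag y = false := by simpa using hy
          have hcs : (x :: y :: rest).map pvFlag = true :: false :: rest.map pvFlag := by
            simp [hx, hy']
          have hS : pvNS false 0 (true :: false :: rest.map pvFlag)
              = 0 :: (pvNS false 0 (false :: rest.map pvFlag)).map (fun k => k + 1) := by
            rw [show pvNS false 0 (true :: false :: rest.map pvFlag)
                  = 0 :: pvNS false 2 (rest.map pvFlag) by simp [pvNS],
                show pvNS false 0 (false :: rest.map pvFlag)
                  = pvNS false 1 (rest.map pvFlag) by simp [pvNS],
                show (2 : Nat) = 1 + 1 from rfl, pvNS_shift]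
          have hE : pvNE 0 (true :: false :: rest.map pvFlag)
              = 0 :: (pvNE 0 (false :: rest.map pvFlag)).map (fun k => k + 1) := by
            rw [show pvNE 0 (true :: false :: rest.map pvFlag)
                  = 0 :: pvNE 2 (rest.map pvFlag) by simp [pvNE],
                show pvNE 0 (false :: rest.map pvFlag)
                  = pvNE 1 (rest.map pvFlag) by simp [pvNE],
                show (2 : Nat) = 1 + 1 from rfl, pvNE_shift]
          have hAlt : pvAlt (x :: y :: rest)
              = pvBlockN (x :: y :: rest) 0 0 :: pvAlt (y :: rest) := by
            rw [pvAlt, hcs, hS, hE, List.zip_cons_cons, List.map_cons, pvMapZipSucc]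
            rw [pvAlt, hds, hy']
          have hM : pvMergeR (x :: y :: rest) = pvBlock1 x :: pvMergeR (y :: rest) := by
            rw [pvMergeR_cons]
            simp [hx, hy']
          rw [hAlt, pvBlockN_single, hM, ih]
    · -- x is an 'equal' op: everything shifts by one
      have hx' : pvFlag x = false := by simpa using hx
      have hcs : (x :: xs).map pvFlag = false :: xs.map pvFlag := by simp [hx']
      calc pvAlt (x :: xs)
          = ((pvNS false 0 (false :: xs.map pvFlag)).zip
              (pvNE 0 (false :: xs.map pvFlag))).map
              (fun se => pvBlockN (x :: xs) se.1 se.2) := by rw [pvAlt, hcs]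
        _ = pvAlt xs := by
            rw [show pvNS false 0 (false :: xs.map pvFlag) = pvNS false 1 (xs.map pvFlag) by
                  simp [pvNS],
                show pvNE 0 (false :: xs.map pvFlag) = pvNE 1 (xs.map pvFlag) by
                  simp [pvNE],
                show (1 : Nat) = 0 + 1 by rfl, pvNS_shift, pvNE_shift, pvMapZipSucc, pvAlt]
        _ = pvMergeR xs := ih
        _ = pvMergeR (x :: xs) := by
            rw [pvMergeR_cons, if_neg (by simp [hx'])]

-- ===== VERDICT (by name: the statement is the Claim_ definition above) =====
theorem merge_adjacent_ops_py_spec : Claim_equal_merge_adjacent_ops_py := by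
  intro ops _
  unfold Spec_merge_adjacent_ops_py
  rw [pvA_eq_runA, pvAlt_eq_port, pvAlt_eq_mergeR, (pvRunA_mergeR ops).1]
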